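-- pv_equiv track=rewrite | github.com/GeorgyDemidenkov/DemidenkovG.D. | 9zadanie/1zadacha.py | find
-- ===== SOURCE A (Python) =====
-- def find(matrix):
--     maxelrow = []
--     minelcolumn = []
--     for row in matrix:
--         maxel = max(row)
--         maxelrow.append(maxel)
--     transposed_matrix = list(zip(*matrix))
--     for column in transposed_matrix:
--         minel = min(column)
--         minelcolumn.append(minel)
--     return maxelrow, minelcolumn
-- ===== SOURCE B (Python) =====
-- def find(matrix):
--     maxelrow = []
--     minelcolumn = None
--     for row in matrix:
--         maxelrow.append(max(row))
--         if minelcolumn is None: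
--             minelcolumn = list(row)
--         else:
--             minelcolumn = [m if m <= x else x for m, x in zip(minelcolumn, row)]
--     return maxelrow, minelcolumn if minelcolumn is not None else []
-- ===== Notes on version B (the rewrite author's own statement) =====
-- stated objective: alternative
-- what changed: B fuses the two passes into one row-major loop that keeps a running element-wise per-column minimum accumulator (zip-truncated to the shortest row seen), instead of building the transposed matrix and scanning its columns.
import Mathlib
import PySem

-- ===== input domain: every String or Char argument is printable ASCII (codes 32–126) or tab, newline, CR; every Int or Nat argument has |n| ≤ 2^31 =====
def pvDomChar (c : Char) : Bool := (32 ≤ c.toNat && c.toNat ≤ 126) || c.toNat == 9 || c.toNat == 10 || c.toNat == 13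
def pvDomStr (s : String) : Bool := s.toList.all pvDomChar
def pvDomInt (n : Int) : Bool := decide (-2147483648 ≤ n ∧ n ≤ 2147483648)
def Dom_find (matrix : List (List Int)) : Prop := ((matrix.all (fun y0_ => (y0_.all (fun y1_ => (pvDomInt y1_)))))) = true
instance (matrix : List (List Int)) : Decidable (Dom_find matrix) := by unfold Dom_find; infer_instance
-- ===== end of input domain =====

-- B fuses the two passes into one loop with a running per-column minimum accumulator (no transpose built); objective: alternative decomposition, same cost.

-- ===== PORT A =====
-- exact model of Python's zip(*matrix): columns truncated at the shortest row, [] for an empty argument list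
def pyZipStar (m : List (List Int)) : List (List Int) :=
  if m = [] then []
  else if m.any (fun r => r.isEmpty) then []
  else (m.map (fun r => r.headD 0)) :: pyZipStar (m.map List.tail)
termination_by (m.headD []).length
decreasing_by
  rename_i h1 h2
  cases m with
  | nil => exact absurd rfl h1
  | cons r rs =>
    cases r with
    | nil => simp at h2
    | cons a t => simp

def find (matrix : List (List Int)) : List Int × List Int :=
  let maxelrow := matrix.foldl (fun acc row => acc ++ [(PySem.List.max? row (fun y => y)).getD 0]) []
  let transposed_matrix := pyZipStar matrix
  let minelcolumn := transposed_matrix.foldl (fun acc col => acc ++ [(PySem.List.min? col (fun y => y)).getD 0]) []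
  (maxelrow, minelcolumn)

-- ===== PORT B =====
def find_alt (matrix : List (List Int)) : List Int × List Int :=
  let st := matrix.foldl
    (fun (st : List Int × Option (List Int)) row =>
      (st.1 ++ [(PySem.List.max? row (fun y => y)).getD 0],
       match st.2 with
       | none => some row
       | some ms => some (List.zipWith (fun m x => if m ≤ x then m else x) ms row)))
    ([], none)
  (st.1, st.2.getD [])

-- ===== PRECONDITION & SPEC =====
-- Pre_ excludes matrices containing an empty row: there Python's max(row) raises ValueError (in A and in B alike).
def Pre_find (matrix : List (List Int)) : Prop := ∀ row ∈ matrix, row ≠ []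
instance (matrix : List (List Int)) : Decidable (Pre_find matrix) := by unfold Pre_find; infer_instance
def pvWitness_find : List (List Int) := [[1, 2, 3], [4, 5]]
def Spec_find (matrix : List (List Int)) (out : List Int × List Int) : Prop := out = find_alt matrix
instance (matrix : List (List Int)) (out : List Int × List Int) : Decidable (Spec_find matrix out) := by unfold Spec_find; infer_instance

-- ===== CLAIM (what is proved, stated in full; the proofs are below) =====
def Claim_equal_find : Prop := ∀ (matrix : List (List Int)), Dom_find matrix → Pre_find matrix → Spec_find matrix (find matrix)

-- ===== LEMMAS AND PROOFS =====

def pvGMax (row : List Int) : Int := (PySem.List.max? row (fun y => y)).getD 0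
def pvMinv (col : List Int) : Int := (PySem.List.min? col (fun y => y)).getD 0

theorem pvMinv_cons (x : Int) (t : List Int) : pvMinv (x :: t) = t.foldl min x := by
  simp [pvMinv, PySem.List.min?_id_cons]

theorem zs_any (m : List (List Int)) (h : m.any (fun r => r.isEmpty) = true) :
    pyZipStar m = [] := by
  rw [pyZipStar]
  by_cases hm : m = [] <;> simp [hm, h]

theorem zs_step (m : List (List Int)) (h1 : m ≠ []) (h2 : ¬ m.any (fun r => r.isEmpty) = true) :
    pyZipStar m = (m.map (fun r => r.headD 0)) :: pyZipStar (m.map List.tail) := by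
  rw [pyZipStar]
  simp [h1, h2]

theorem foldl_app_map (g : List Int → Int) (xs : List (List Int)) (acc : List Int) :
    xs.foldl (fun a x => a ++ [g x]) acc = acc ++ xs.map g := by
  induction xs generalizing acc with
  | nil => simp
  | cons x t ih => simp [List.foldl, ih]

theorem zipWith_if_min (xs ys : List Int) :
    List.zipWith (fun (m x : Int) => if m ≤ x then m else x) xs ys = List.zipWith min xs ys := by
  induction xs generalizing ys with
  | nil => simp
  | cons a t ih =>
    cases ys with
    | nil => simp
    | cons b u => simp [ih, min_def]

theorem zipStar_single (r : List Int) : (pyZipStar [r]).map pvMinv = r := by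
  induction r with
  | nil => rw [zs_any] <;> simp
  | cons a t ih =>
    rw [zs_step] <;> simp
    simp [pvMinv_cons, ih]

theorem zipStar_fuse (r : List Int) : ∀ (s : List Int) (rs : List (List Int)),
    (pyZipStar (r :: s :: rs)).map pvMinv = (pyZipStar (List.zipWith min r s :: rs)).map pvMinv := by
  induction r with
  | nil =>
    intro s rs
    rw [zs_any _ (by simp), zs_any _ (by simp)]
  | cons a r' ih =>
    intro s rs
    cases s with
    | nil => rw [zs_any _ (by simp), zs_any _ (by simp)]
    | cons b s' =>
      by_cases h : rs.any (fun r => r.isEmpty)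
      · rw [zs_any _ (by simp [h]), zs_any _ (by simp [h])]
      · rw [zs_step ((a :: r') :: (b :: s') :: rs) (by simp) (by simp [h])]
        simp only [List.zipWith_cons_cons]
        rw [zs_step ((min a b :: List.zipWith min r' s') :: rs) (by simp) (by simp [h])]
        simp only [List.map_cons, List.headD_cons, List.tail_cons]
        rw [pvMinv_cons, pvMinv_cons]
        simp only [List.foldl_cons]
        congr 1
        exact ih s' (rs.map List.tail)

theorem zipStar_foldl (rs : List (List Int)) : ∀ (r : List Int),
    (pyZipStar (r :: rs)).map pvMinv = rs.foldl (fun a b => List.zipWith min a b) r := by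
  induction rs with
  | nil => intro r; exact zipStar_single r
  | cons s rs' ih =>
    intro r
    rw [List.foldl_cons, ← ih (List.zipWith min r s)]
    exact zipStar_fuse r s rs'

theorem find_eq (m : List (List Int)) :
    find m = (m.map pvGMax, (pyZipStar m).map pvMinv) := by
  unfold find
  rw [show (fun (acc : List Int) row => acc ++ [(PySem.List.max? row (fun y => y)).getD 0])
      = (fun (a : List Int) x => a ++ [pvGMax x]) from rfl,
     show (fun (acc : List Int) col => acc ++ [(PySem.List.min? col (fun y => y)).getD 0])
      = (fun (a : List Int) x => a ++ [pvMinv x]) from rfl,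
  ]
  simp only [foldl_app_map, List.nil_append]

theorem bfold (rs : List (List Int)) : ∀ (acc ms : List Int),
    rs.foldl
      (fun (st : List Int × Option (List Int)) row =>
        (st.1 ++ [(PySem.List.max? row (fun y => y)).getD 0],
         match st.2 with
         | none => some row
         | some ms => some (List.zipWith (fun m x => if m ≤ x then m else x) ms row)))
      (acc, some ms)
    = (acc ++ rs.map pvGMax, some (rs.foldl (fun a b => List.zipWith min a b) ms)) := by
  induction rs with
  | nil => intro acc ms; simp
  | cons row rs' ih =>
    intro acc ms
    simp only [List.foldl_cons, List.map_cons]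
    rw [ih]
    simp [pvGMax, zipWith_if_min]

theorem find_alt_eq (m : List (List Int)) :
    find_alt m = (m.map pvGMax,
      (m.headD []) |> (fun r => if m = [] then [] else (m.tail).foldl (fun a b => List.zipWith min a b) r)) := by
  cases m with
  | nil => rfl
  | cons r rs =>
    unfold find_alt
    simp only [List.foldl_cons, List.nil_append]
    rw [bfold]
    simp [pvGMax]

-- ===== VERDICT (by name: the statement is the Claim_ definition above) =====
theorem find_spec : Claim_equal_find := by
  intro matrix _ _
  unfold Spec_find
  rw [find_eq, find_alt_eq]
  cases matrix with
  | nil => simp [pyZipStar]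
  | cons r rs =>
    simp only [List.headD_cons, List.tail_cons, List.cons_ne_nil, if_neg,
      not_false_eq_true]
    rw [zipStar_foldl]
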